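-- pv_equiv track=rewrite | github.com/Xelaro2304/Introduction-to-programmin-MOOC-2023 | part05/part05-23_create_tuple/src/create_tuple.py | create_tuple
-- ===== SOURCE A (Python) =====
-- def create_tuple(x: int, y: int, z: int):
--     reference = [x,y,z]
--     sorted_list = sorted(reference)
--     addition = 0
--     for i in reference:
--         addition += i
--     instruction = (sorted_list[0], sorted_list[-1], addition)
--     return instruction
-- ===== SOURCE B (Python) =====
-- def create_tuple(x: int, y: int, z: int):
--     return (min(x, y, z), max(x, y, z), x + y + z)
-- ===== Notes on version B (the rewrite author's own statement) =====
-- stated objective: idiomatic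
-- what changed: Replaced the sort-then-index-plus-accumulator-loop with direct min/max/sum builtins, no sorting and no loop.
import Mathlib
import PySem

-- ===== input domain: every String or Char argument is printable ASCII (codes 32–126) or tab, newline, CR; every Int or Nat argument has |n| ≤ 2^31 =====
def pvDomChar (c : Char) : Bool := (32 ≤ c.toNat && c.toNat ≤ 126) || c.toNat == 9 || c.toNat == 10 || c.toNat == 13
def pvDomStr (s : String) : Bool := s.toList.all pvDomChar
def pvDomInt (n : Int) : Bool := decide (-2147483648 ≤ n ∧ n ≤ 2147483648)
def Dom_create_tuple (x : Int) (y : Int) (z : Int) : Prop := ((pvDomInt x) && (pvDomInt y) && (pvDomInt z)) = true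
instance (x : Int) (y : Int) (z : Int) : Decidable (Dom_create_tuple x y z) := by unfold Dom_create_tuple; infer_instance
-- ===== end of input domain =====

-- ===== PORT A =====
-- Header: B computes min/max/sum directly instead of sorting and looping (idiomatic, same cost).
def create_tuple (x : Int) (y : Int) (z : Int) : Int × Int × Int :=
  let reference : List Int := [x, y, z]
  let sorted_list := PySem.List.sorted reference (fun a => a) false
  let addition : Int := reference.foldl (fun acc i => acc + i) 0
  ((PySem.List.pyGet? sorted_list 0).getD 0, (PySem.List.pyGet? sorted_list (-1)).getD 0, addition)

-- ===== PORT B =====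
def create_tuple_alt (x : Int) (y : Int) (z : Int) : Int × Int × Int :=
  (min x (min y z), max x (max y z), x + y + z)

-- ===== PRECONDITION & SPEC =====
def Spec_create_tuple (x : Int) (y : Int) (z : Int) (out : Int × Int × Int) : Prop := out = create_tuple_alt x y z
instance (x : Int) (y : Int) (z : Int) (out : Int × Int × Int) : Decidable (Spec_create_tuple x y z out) := by unfold Spec_create_tuple; infer_instance

-- ===== CLAIM (what is proved, stated in full; the proofs are below) =====
def Claim_equal_create_tuple : Prop := ∀ (x : Int) (y : Int) (z : Int), Dom_create_tuple x y z → Spec_create_tuple x y z (create_tuple x y z)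

-- ===== LEMMAS AND PROOFS =====

-- ===== VERDICT (by name: the statement is the Claim_ definition above) =====
theorem create_tuple_spec : Claim_equal_create_tuple := by
  intro x y z _
  unfold Spec_create_tuple create_tuple create_tuple_alt
  simp only [PySem.List.sorted_eq_foldl_insertBy, List.foldl]
  simp only [PySem.List.insertBy]
  split_ifs <;> simp only [PySem.List.insertBy] <;> split_ifs <;>
    simp_all [PySem.List.pyGet?, PySem.List.pyIdx?, min_def, max_def] <;> omega
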